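-- pv_equiv track=rewrite | github.com/fleabucket/getlivebugs | scripts/maintenance/match_species.py | extract_world
-- ===== SOURCE A (Python) =====
-- def extract_world(tags):
--     """Extract New World / Old World classification from tags."""
--     if not tags:
--         return None
--     tag_set = {t.lower().strip() for t in tags}
--
--     if 'new world' in tag_set:
--         return 'New World'
--     if 'old world' in tag_set:
--         return 'Old World'
--
--     return None
-- ===== SOURCE B (Python) =====
-- def extract_world(tags):
--     """Extract New World / Old World classification from tags."""
--     if not tags:
--         return None
--     found_old = False
--     for t in tags:
--         norm = t.lower().strip()
--         if norm == 'new world':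
--             return 'New World'
--         if norm == 'old world':
--             found_old = True
--     return 'Old World' if found_old else None
-- ===== Notes on version B (the rewrite author's own statement) =====
-- stated objective: alternative
-- what changed: Replaced the build-a-set-then-two-membership-tests decomposition with a single pass over the tags that returns 'New World' on first match and remembers 'old world' in a boolean flag.
import Mathlib
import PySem

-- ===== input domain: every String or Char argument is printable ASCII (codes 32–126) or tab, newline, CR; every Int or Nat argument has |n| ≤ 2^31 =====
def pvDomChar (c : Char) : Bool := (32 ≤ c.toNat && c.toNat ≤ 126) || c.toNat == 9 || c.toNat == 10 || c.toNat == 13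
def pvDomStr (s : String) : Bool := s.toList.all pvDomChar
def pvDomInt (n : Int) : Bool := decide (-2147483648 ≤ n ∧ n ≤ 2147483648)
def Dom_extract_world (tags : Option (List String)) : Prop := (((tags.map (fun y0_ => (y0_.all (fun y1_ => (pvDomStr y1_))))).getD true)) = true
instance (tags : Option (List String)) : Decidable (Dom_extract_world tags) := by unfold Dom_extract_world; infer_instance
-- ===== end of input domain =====

-- B replaces A's set construction + two membership tests by a single pass with an early
-- return on 'new world' and a boolean flag for 'old world' (alternative decomposition).


-- ===== PORT A =====
def extract_world (tags : Option (List String)) : Option String :=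
  match tags with
  | none => none
  | some ts =>
    if ts = [] then none
    else
      let tag_set : PySem.Set String :=
        PySem.Set.ofList (ts.map (fun t => PySem.Str.strip (PySem.Str.lower t)))
      if PySem.Set.contains tag_set "new world" then some "New World"
      else if PySem.Set.contains tag_set "old world" then some "Old World"
      else none

-- ===== PORT B =====
def ewLoop (ts : List String) (foundOld : Bool) : Option String :=
  match ts with
  | [] => if foundOld then some "Old World" else none
  | t :: rest =>
    let norm := PySem.Str.strip (PySem.Str.lower t)
    if norm = "new world" then some "New World"
    else ewLoop rest (foundOld || norm == "old world")

def extract_world_alt (tags : Option (List String)) : Option String :=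
  match tags with
  | none => none
  | some ts =>
    if ts = [] then none
    else ewLoop ts false

-- ===== PRECONDITION & SPEC =====
def Spec_extract_world (tags : Option (List String)) (out : Option String) : Prop := out = extract_world_alt tags
instance (tags : Option (List String)) (out : Option String) : Decidable (Spec_extract_world tags out) := by unfold Spec_extract_world; infer_instance

-- ===== CLAIM (what is proved, stated in full; the proofs are below) =====
def Claim_equal_extract_world : Prop := ∀ (tags : Option (List String)), Dom_extract_world tags → Spec_extract_world tags (extract_world tags)

-- ===== LEMMAS AND PROOFS =====
theorem ewLoop_eq (ts : List String) (fo : Bool) :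
    ewLoop ts fo =
      if (ts.map (fun t => PySem.Str.strip (PySem.Str.lower t))).contains "new world" then
        some "New World"
      else if fo || (ts.map (fun t => PySem.Str.strip (PySem.Str.lower t))).contains "old world" then
        some "Old World"
      else none := by
  induction ts generalizing fo with
  | nil => simp [ewLoop]
  | cons t rest ih =>
    simp only [ewLoop, ih, List.map_cons, List.contains_cons]
    by_cases h1 : PySem.Str.strip (PySem.Str.lower t) = "new world"
    · simp [h1]
    · by_cases h2 : PySem.Str.strip (PySem.Str.lower t) = "old world"
      · simp [h1, Ne.symm h1, h2]
      · simp [h1, Ne.symm h1, h2, Ne.symm h2, Bool.or_assoc]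

-- ===== VERDICT (by name: the statement is the Claim_ definition above) =====
theorem extract_world_spec : Claim_equal_extract_world := by
  intro tags _
  unfold Spec_extract_world extract_world extract_world_alt
  cases tags with
  | none => rfl
  | some ts =>
    by_cases h : ts = []
    · simp [h]
    · simp [h, ewLoop_eq, PySem.Set.contains, PySem.Set.mem_ofList]
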